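-- pv_equiv track=rewrite | github.com/AlenT1/autoticket | tests/jira_task_agent/test_may1_extract_diff_live.py | _may1_add_mon_new
-- ===== SOURCE A (Python) =====
-- def _may1_add_mon_new(text: str) -> str:
--     marker = (
--         "- MON-NEW Add 2026-Q3-DEADLINE-MAY1C burst-alerting verification "
--         "for spike traffic during launch\n"
--     )
--     lines = text.splitlines(keepends=True)
--     in_c = False
--     for i, line in enumerate(lines):
--         if line.startswith("## C. Monitoring"):
--             in_c = True
--             continue
--         if in_c and line.startswith("## "):
--             lines.insert(i, marker)
--             return "".join(lines)
--     return text + "\n" + marker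
-- ===== SOURCE B (Python) =====
-- def _find_at_linestart(text, pat, start, excl):
--     # first index q >= start where pat occurs at the start of a line
--     # (q == 0 or preceded by '\r'/'\n') and, if excl is given, the text at q
--     # does not start with excl; -1 if there is none
--     p = text.find(pat, start)
--     if p == -1:
--         return -1
--     if (p == 0 or text[p - 1] in "\r\n") and not (excl is not None and text.startswith(excl, p)):
--         return p
--     return _find_at_linestart(text, pat, p + 1, excl)
--
--
-- def _may1_add_mon_new(text: str) -> str:
--     marker = (
--         "- MON-NEW Add 2026-Q3-DEADLINE-MAY1C burst-alerting verification "
--         "for spike traffic during launch\n"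
--     )
--     MON = "## C. Monitoring"
--     p = _find_at_linestart(text, MON, 0, None)
--     if p != -1:
--         q = _find_at_linestart(text, "## ", p + 1, MON)
--         if q != -1:
--             return text[:q] + marker + text[q:]
--     return text + "\n" + marker
-- ===== Notes on version B (the rewrite author's own statement) =====
-- stated objective: alternative
-- what changed: B never splits the text into lines: it works on the raw string with str.find substring search (find an occurrence of the monitoring header at a line boundary, then the next '## ' occurrence at a line boundary that is not the monitoring header) and builds the result by string slicing text[:q]+marker+text[q:], instead of A's enumerate over splitlines(keepends=True) with a flag and lines.insert.
import Mathlib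
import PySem

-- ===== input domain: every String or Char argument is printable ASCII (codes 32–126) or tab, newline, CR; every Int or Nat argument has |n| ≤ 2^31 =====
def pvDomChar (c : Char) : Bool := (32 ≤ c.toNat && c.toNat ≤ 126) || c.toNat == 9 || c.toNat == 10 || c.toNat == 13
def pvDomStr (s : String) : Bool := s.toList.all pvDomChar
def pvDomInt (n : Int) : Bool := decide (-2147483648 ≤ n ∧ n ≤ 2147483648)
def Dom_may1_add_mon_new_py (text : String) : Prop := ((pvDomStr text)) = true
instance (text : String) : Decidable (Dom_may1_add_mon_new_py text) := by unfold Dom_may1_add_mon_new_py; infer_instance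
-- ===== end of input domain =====

-- B replaces A's splitlines+flagged scan+insert by raw-text substring search (str.find)
-- at line boundaries with string slicing; same cost, genuinely different algorithm.

-- ===== PORT A =====
-- text.splitlines(keepends=True), ported by hand; exact on the stated domain
-- (printable ASCII plus tab/newline/CR), where the only line boundaries are
-- "\n", "\r" and "\r\n".
def pvSplitKeep : List Char → List Char → List (List Char)
  | [], acc => if acc = [] then [] else [acc.reverse]
  | '\r' :: '\n' :: rest, acc => (acc.reverse ++ ['\r', '\n']) :: pvSplitKeep rest []
  | '\n' :: rest, acc => (acc.reverse ++ ['\n']) :: pvSplitKeep rest []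
  | '\r' :: rest, acc => (acc.reverse ++ ['\r']) :: pvSplitKeep rest []
  | c :: rest, acc => pvSplitKeep rest (c :: acc)

def pvMarker : List Char :=
  ("- MON-NEW Add 2026-Q3-DEADLINE-MAY1C burst-alerting verification for spike traffic during launch\n").toList

def pvMonHdr : List Char := ("## C. Monitoring").toList
def pvHdr : List Char := ("## ").toList

def pvAGo (lines : List (List Char)) : List (List Char) → Nat → Bool → Option (List Char)
  | [], _, _ => none
  | line :: rest, i, inc =>
    if PySem.Chars.startswith line pvMonHdr then pvAGo lines rest (i + 1) true
    else if inc && PySem.Chars.startswith line pvHdr then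
      some ((PySem.List.insert lines (i : Int) pvMarker).flatten)
    else pvAGo lines rest (i + 1) inc

def may1_add_mon_new_py (text : String) : String :=
  let lines := pvSplitKeep text.toList []
  match pvAGo lines lines 0 false with
  | some cs => String.ofList cs
  | none => String.ofList (text.toList ++ '\n' :: pvMarker)

-- ===== PORT B =====
-- port of B's helper _find_at_linestart (text.find via PySem.Chars.findFrom;
-- text.startswith(excl, p) is exact as startswith on the suffix for 0 ≤ p ≤ len;
-- the fuel argument only makes the recursion structural: fuel = len(text)+1
-- is enough because each recursive call strictly increases start)
def pvFindLS (cs pat : List Char) (excl : Option (List Char)) : Nat → Nat → Option Nat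
  | 0, _ => none
  | fuel + 1, start =>
    if PySem.Chars.findFrom cs pat (start : Int) = -1 then none
    else
      let p := (PySem.Chars.findFrom cs pat (start : Int)).toNat
      if (p == 0 || cs[p-1]? == some '\r' || cs[p-1]? == some '\n') &&
          !(excl.any fun e => PySem.Chars.startswith (cs.drop p) e) then some p
      else pvFindLS cs pat excl fuel (p + 1)

def may1_add_mon_new_py_alt (text : String) : String :=
  let cs := text.toList
  match pvFindLS cs pvMonHdr none (cs.length + 1) 0 with
  | some p =>
    match pvFindLS cs pvHdr (some pvMonHdr) (cs.length + 1) (p + 1) with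
    | some q => String.ofList (cs.take q ++ pvMarker ++ cs.drop q)
    | none => String.ofList (cs ++ '\n' :: pvMarker)
  | none => String.ofList (cs ++ '\n' :: pvMarker)

-- ===== PRECONDITION & SPEC =====
def Spec_may1_add_mon_new_py (text : String) (out : String) : Prop := out = may1_add_mon_new_py_alt text
instance (text : String) (out : String) : Decidable (Spec_may1_add_mon_new_py text out) := by unfold Spec_may1_add_mon_new_py; infer_instance

-- ===== CLAIM (what is proved, stated in full; the proofs are below) =====
def Claim_equal_may1_add_mon_new_py : Prop := ∀ (text : String), Dom_may1_add_mon_new_py text → Spec_may1_add_mon_new_py text (may1_add_mon_new_py text)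

-- ===== LEMMAS AND PROOFS =====

-- ===== line-level view of A (proof-side) =====
def pvFindMon : List (List Char) → Nat → Option Nat
  | [], _ => none
  | l :: rest, i =>
    if PySem.Chars.startswith l pvMonHdr then some i else pvFindMon rest (i + 1)

def pvFindHdr : List (List Char) → Nat → Option Nat
  | [], _ => none
  | l :: rest, j =>
    if PySem.Chars.startswith l pvHdr && !PySem.Chars.startswith l pvMonHdr then some j
    else pvFindHdr rest (j + 1)

lemma pvAGo_true (lines : List (List Char)) : ∀ (suf : List (List Char)) (j : Nat),
    pvAGo lines suf j true =
      (pvFindHdr suf j).map (fun (k : Nat) => (PySem.List.insert lines ((k : Nat) : Int) pvMarker).flatten) := by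
  intro suf
  induction suf with
  | nil => intro j; simp [pvAGo, pvFindHdr]
  | cons l rest ih =>
    intro j
    by_cases hm : PySem.Chars.startswith l pvMonHdr
    · simp [pvAGo, pvFindHdr, hm, ih]
    · by_cases hh : PySem.Chars.startswith l pvHdr
      · simp [pvAGo, pvFindHdr, hm, hh]
      · simp [pvAGo, pvFindHdr, hm, hh, ih]

lemma pvAGo_false (lines : List (List Char)) : ∀ (fuel i : Nat),
    lines.length ≤ i + fuel →
    pvAGo lines (lines.drop i) i false =
      (match pvFindMon (lines.drop i) i with
       | none => none
       | some i0 =>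
         (pvFindHdr (lines.drop (i0 + 1)) (i0 + 1)).map
           (fun (k : Nat) => (PySem.List.insert lines ((k : Nat) : Int) pvMarker).flatten)) := by
  intro fuel
  induction fuel with
  | zero =>
    intro i hi
    have hd : lines.drop i = [] := List.drop_eq_nil_of_le (by omega)
    simp [hd, pvAGo, pvFindMon]
  | succ m ih =>
    intro i hi
    rcases hlt : lines.drop i with _ | ⟨l, rest⟩
    · simp [pvAGo, pvFindMon]
    · have hiLt : i < lines.length := by
        by_contra h
        rw [List.drop_eq_nil_of_le (by omega)] at hlt; cases hlt
      have hrest : rest = lines.drop (i + 1) := by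
        have h1 : (lines.drop i).drop 1 = lines.drop (i + 1) := List.drop_drop
        rw [hlt] at h1
        simpa using h1
      by_cases hm : PySem.Chars.startswith l pvMonHdr
      · simp [pvAGo, pvFindMon, hm, hrest, pvAGo_true]
      · have := ih (i + 1) (by omega)
        simp only [pvAGo, pvFindMon, hm, Bool.false_and, hrest]
        simpa using this

-- first-index characterizations of the line-level searches
lemma pvFindMon_none : ∀ (suf : List (List Char)) (n : Nat),
    pvFindMon suf n = none → ∀ l ∈ suf, PySem.Chars.startswith l pvMonHdr = false := by
  intro suf
  induction suf with
  | nil => simp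
  | cons l rest ih =>
    intro n h
    simp only [pvFindMon] at h
    split at h
    · cases h
    · intro l' hl'
      rw [List.mem_cons] at hl'
      rcases hl' with rfl | hl'
      · exact eq_false_of_ne_true ‹_›
      · exact ih (n+1) h l' hl'

lemma pvFindMon_some : ∀ (suf : List (List Char)) (n j : Nat),
    pvFindMon suf n = some j →
      n ≤ j ∧ j - n < suf.length ∧
      (∃ l, suf[j - n]? = some l ∧ PySem.Chars.startswith l pvMonHdr = true) ∧
      (∀ m, m < j - n → ∀ l, suf[m]? = some l → PySem.Chars.startswith l pvMonHdr = false) := by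
  intro suf
  induction suf with
  | nil => intro n j h; simp [pvFindMon] at h
  | cons l rest ih =>
    intro n j h
    simp only [pvFindMon] at h
    split at h
    · cases h
      refine ⟨le_refl _, by simp, ⟨l, by simp, ‹_›⟩, ?_⟩
      intro m hm
      exact absurd hm (by omega)
    · obtain ⟨h1, h2, ⟨l', hl', hsw⟩, hmin⟩ := ih (n+1) j h
      refine ⟨by omega, by simp only [List.length_cons]; omega, ⟨l', ?_, hsw⟩, ?_⟩
      · have hjn : j - n = (j - (n+1)) + 1 := by omega
        rw [hjn]; simpa using hl'
      · intro m hm l'' hl''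
        rcases m with _ | m
        · simp at hl''; subst hl''; exact eq_false_of_ne_true ‹_›
        · have hmlt : m < j - (n+1) := by omega
          exact hmin m hmlt l'' (by simpa using hl'')

lemma pvFindHdr_none : ∀ (suf : List (List Char)) (n : Nat),
    pvFindHdr suf n = none →
    ∀ l ∈ suf, (PySem.Chars.startswith l pvHdr && !PySem.Chars.startswith l pvMonHdr) = false := by
  intro suf
  induction suf with
  | nil => simp
  | cons l rest ih =>
    intro n h
    simp only [pvFindHdr] at h
    split at h
    · cases h
    · intro l' hl'
      rw [List.mem_cons] at hl'
      rcases hl' with rfl | hl'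
      · exact eq_false_of_ne_true ‹_›
      · exact ih (n+1) h l' hl'

lemma pvFindHdr_some : ∀ (suf : List (List Char)) (n j : Nat),
    pvFindHdr suf n = some j →
      n ≤ j ∧ j - n < suf.length ∧
      (∃ l, suf[j - n]? = some l ∧ (PySem.Chars.startswith l pvHdr && !PySem.Chars.startswith l pvMonHdr) = true) ∧
      (∀ m, m < j - n → ∀ l, suf[m]? = some l →
        (PySem.Chars.startswith l pvHdr && !PySem.Chars.startswith l pvMonHdr) = false) := by
  intro suf
  induction suf with
  | nil => intro n j h; simp [pvFindHdr] at h
  | cons l rest ih =>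
    intro n j h
    simp only [pvFindHdr] at h
    split at h
    · cases h
      refine ⟨le_refl _, by simp, ⟨l, by simp, ‹_›⟩, ?_⟩
      intro m hm
      exact absurd hm (by omega)
    · obtain ⟨h1, h2, ⟨l', hl', hsw⟩, hmin⟩ := ih (n+1) j h
      refine ⟨by omega, by simp only [List.length_cons]; omega, ⟨l', ?_, hsw⟩, ?_⟩
      · have hjn : j - n = (j - (n+1)) + 1 := by omega
        rw [hjn]; simpa using hl'
      · intro m hm l'' hl''
        rcases m with _ | m
        · simp at hl''; subst hl''; exact eq_false_of_ne_true ‹_›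
        · have hmlt : m < j - (n+1) := by omega
          exact hmin m hmlt l'' (by simpa using hl'')

-- ===== shape of splitlines(keepends=True) output =====
def pvShape (lastLine : Bool) (l : List Char) : Prop :=
  ∃ body t, l = body ++ t ∧ (∀ c ∈ body, c ≠ '\n' ∧ c ≠ '\r') ∧
    (t = ['\n'] ∨ t = ['\r'] ∨ t = ['\r', '\n'] ∨ (lastLine = true ∧ t = [] ∧ body ≠ []))

def pvShapes : List (List Char) → Prop
  | [] => True
  | [l] => pvShape true l
  | l :: rest => pvShape false l ∧ pvShapes rest

lemma pvShape_false_true {l : List Char} (h : pvShape false l) : pvShape true l := by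
  obtain ⟨b, t, h1, h2, h3⟩ := h
  exact ⟨b, t, h1, h2, by tauto⟩

lemma pvShape_ne_nil {l : List Char} (h : pvShape true l) : l ≠ [] := by
  obtain ⟨b, t, rfl, h2, h3⟩ := h
  rcases h3 with rfl | rfl | rfl | ⟨_, rfl, hb⟩ <;> simp [*]

lemma pvShapes_cons_intro {l : List Char} {rest : List (List Char)}
    (hl : pvShape false l) (hr : pvShapes rest) : pvShapes (l :: rest) := by
  cases rest with
  | nil => exact pvShape_false_true hl
  | cons a b => exact ⟨hl, hr⟩

lemma pvShapes_get : ∀ (L : List (List Char)), pvShapes L → ∀ (i : Nat) (l : List Char), L[i]? = some l →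
    pvShape true l ∧ (i + 1 < L.length → pvShape false l) := by
  intro L
  induction L with
  | nil => intro _ i l h; simp at h
  | cons a rest ih =>
    intro hsh i l h
    cases rest with
    | nil =>
      rcases i with _ | i
      · simp at h; subst h
        exact ⟨hsh, by intro hlt; simp at hlt⟩
      · simp at h
    | cons b c =>
      obtain ⟨ha, hr⟩ := hsh
      rcases i with _ | i
      · simp at h; subst h
        exact ⟨pvShape_false_true ha, fun _ => ha⟩
      · have := ih hr i l (by simpa using h)
        refine ⟨this.1, fun hlt => this.2 ?_⟩
        simp only [List.length_cons] at hlt ⊢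
        omega

lemma pvSplitKeep_shapes : ∀ (cs acc : List Char),
    (∀ c ∈ acc, c ≠ '\n' ∧ c ≠ '\r') → pvShapes (pvSplitKeep cs acc) := by
  intro cs acc
  induction cs, acc using pvSplitKeep.induct with
  | case1 => intro _; rw [pvSplitKeep]; simp [pvShapes]
  | case2 acc hne =>
    intro hacc
    rw [pvSplitKeep]
    rw [if_neg hne]
    show pvShape true acc.reverse
    refine ⟨acc.reverse, [], by simp, ?_, ?_⟩
    · intro c hc; exact hacc c (by simpa using hc)
    · right; right; right; exact ⟨rfl, rfl, by simpa using hne⟩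
  | case3 rest acc ih =>
    intro hacc
    rw [pvSplitKeep]
    refine pvShapes_cons_intro ⟨acc.reverse, ['\r', '\n'], rfl, ?_, by right; right; left; rfl⟩ (ih (by simp))
    intro c hc; exact hacc c (by simpa using hc)
  | case4 rest acc ih =>
    intro hacc
    rw [pvSplitKeep]
    refine pvShapes_cons_intro ⟨acc.reverse, ['\n'], rfl, ?_, by left; rfl⟩ (ih (by simp))
    intro c hc; exact hacc c (by simpa using hc)
  | case5 rest acc hno ih =>
    intro hacc
    rw [pvSplitKeep.eq_4 _ _ (fun r h => hno r h)]
    refine pvShapes_cons_intro ⟨acc.reverse, ['\r'], rfl, ?_, by right; left; rfl⟩ (ih (by simp))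
    intro c hc; exact hacc c (by simpa using hc)
  | case6 c rest acc h1 h2 h3 ih =>
    intro hacc
    rw [pvSplitKeep.eq_5 _ _ _ (fun r hc hr => h1 r hc hr) (fun hc => h2 hc) (fun hc => h3 hc)]
    refine ih ?_
    intro c' hc'
    rcases List.mem_cons.mp hc' with rfl | hc'
    · exact ⟨fun h => h2 h, fun h => h3 h⟩
    · exact hacc c' hc'

lemma pvSplitKeep_flatten : ∀ (cs acc : List Char),
    (pvSplitKeep cs acc).flatten = acc.reverse ++ cs := by
  intro cs acc
  induction cs, acc using pvSplitKeep.induct with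
  | case1 => rw [pvSplitKeep]; simp
  | case2 acc hne => rw [pvSplitKeep]; rw [if_neg hne]; simp
  | case3 rest acc ih => rw [pvSplitKeep]; simp [ih]
  | case4 rest acc ih => rw [pvSplitKeep]; simp [ih]
  | case5 rest acc hno ih =>
    rw [pvSplitKeep.eq_4 _ _ (fun r h => hno r h)]; simp [ih]
  | case6 c rest acc h1 h2 h3 ih =>
    rw [pvSplitKeep.eq_5 _ _ _ (fun r hc hr => h1 r hc hr) (fun hc => h2 hc) (fun hc => h3 hc)]
    simp [ih]

-- ===== character positions of line starts =====
def pvPos (L : List (List Char)) (j : Nat) : Nat := ((L.take j).flatten).length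

lemma pvPos_zero (L : List (List Char)) : pvPos L 0 = 0 := rfl

lemma pvPos_cons_succ (l : List Char) (rest : List (List Char)) (i : Nat) :
    pvPos (l :: rest) (i + 1) = l.length + pvPos rest i := by
  simp [pvPos]

lemma pvPos_add (L : List (List Char)) {i j : Nat} (h : i ≤ j) :
    pvPos L j = pvPos L i + ((L.drop i).take (j - i)).flatten.length := by
  have : j = i + (j - i) := by omega
  rw [pvPos, this, List.take_add]
  simp [pvPos]

lemma pvPos_mono (L : List (List Char)) {i j : Nat} (h : i ≤ j) : pvPos L i ≤ pvPos L j := by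
  rw [pvPos_add L h]; omega

lemma pvPos_strict (L : List (List Char)) {i j : Nat} {l : List Char}
    (hij : i < j) (hl : L[i]? = some l) (hne : l ≠ []) : pvPos L i < pvPos L j := by
  rw [pvPos_add L (le_of_lt hij)]
  have hilt : i < L.length := by
    by_contra hx
    rw [List.getElem?_eq_none (by omega)] at hl; cases hl
  have hdrop : L.drop i = l :: L.drop (i + 1) := by
    rw [List.drop_eq_getElem_cons hilt]
    congr 1
    have := List.getElem?_eq_getElem hilt
    rw [hl] at this; exact (Option.some_inj.mp this).symm
  rw [hdrop]
  have hji : j - i = (j - i - 1) + 1 := by omega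
  rw [hji]
  simp only [List.take_succ_cons, List.flatten_cons, List.length_append]
  have : l.length ≠ 0 := fun hx => hne (List.eq_nil_of_length_eq_zero hx)
  omega

lemma pvPos_length (L : List (List Char)) : pvPos L L.length = L.flatten.length := by
  simp [pvPos]

lemma pvPos_drop (L : List (List Char)) (j : Nat) :
    (L.flatten).drop (pvPos L j) = (L.drop j).flatten := by
  have h : L.flatten = (L.take j).flatten ++ (L.drop j).flatten := by
    rw [← List.flatten_append, List.take_append_drop]
  rw [pvPos, h, List.drop_left]

lemma pvPos_take (L : List (List Char)) (j : Nat) :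
    (L.flatten).take (pvPos L j) = (L.take j).flatten := by
  have h : L.flatten = (L.take j).flatten ++ (L.drop j).flatten := by
    rw [← List.flatten_append, List.take_append_drop]
  rw [pvPos, h, List.take_left]

lemma pvDrop_at (L : List (List Char)) {i : Nat} {l : List Char} (hl : L[i]? = some l) :
    (L.flatten).drop (pvPos L i) = l ++ (L.drop (i + 1)).flatten := by
  rw [pvPos_drop]
  have hilt : i < L.length := by
    by_contra hx
    rw [List.getElem?_eq_none (by omega)] at hl; cases hl
  rw [List.drop_eq_getElem_cons hilt]
  have := List.getElem?_eq_getElem hilt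
  rw [hl] at this
  rw [← Option.some_inj.mp this]
  rfl

lemma pvDrop_at_k (L : List (List Char)) {i k : Nat} {l : List Char}
    (hl : L[i]? = some l) (hk : k ≤ l.length) :
    (L.flatten).drop (pvPos L i + k) = l.drop k ++ (L.drop (i + 1)).flatten := by
  rw [← List.drop_drop, pvDrop_at L hl, List.drop_append_of_le_length hk]

lemma pvGet_at_k (L : List (List Char)) {i k : Nat} {l : List Char}
    (hl : L[i]? = some l) (hk : k < l.length) :
    (L.flatten)[pvPos L i + k]? = l[k]? := by
  rw [← List.head?_drop, pvDrop_at_k L hl (le_of_lt hk)]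
  have : l.drop k ≠ [] := by
    intro hx
    have := congrArg List.length hx
    simp [List.length_drop] at this
    omega
  rw [List.head?_append_of_ne_nil _ this, List.head?_drop]

-- decomposition of any in-range character position as line + offset
lemma pvFlatten_decomp : ∀ (L : List (List Char)) (q : Nat), q < L.flatten.length →
    ∃ i l k, L[i]? = some l ∧ k < l.length ∧ q = pvPos L i + k := by
  intro L
  induction L with
  | nil => intro q hq; simp at hq
  | cons l rest ih =>
    intro q hq
    by_cases hql : q < l.length
    · exact ⟨0, l, q, by simp, hql, by simp [pvPos_zero]⟩
    · have : q - l.length < rest.flatten.length := by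
        simp only [List.flatten_cons, List.length_append] at hq
        omega
      obtain ⟨i, l', k, h1, h2, h3⟩ := ih (q - l.length) this
      exact ⟨i + 1, l', k, by simpa using h1, h2, by rw [pvPos_cons_succ]; omega⟩

-- a terminator-free pattern matches at a line start iff it is a prefix of that line
lemma pvPrefix_at_pos {L : List (List Char)} (hsh : pvShapes L) {pat : List Char}
    (_hpat : pat ≠ []) (hterm : ∀ c ∈ pat, c ≠ '\n' ∧ c ≠ '\r')
    {i : Nat} {l : List Char} (hl : L[i]? = some l) :
    pat <+: (L.flatten).drop (pvPos L i) ↔ pat <+: l := by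
  have hilt : i < L.length := by
    by_contra hx
    rw [List.getElem?_eq_none (by omega)] at hl; cases hl
  rw [pvDrop_at L hl]
  constructor
  · intro h
    by_cases hlast : i + 1 < L.length
    · -- non-final line: it ends with a terminator, so pat cannot overrun it
      rcases List.prefix_or_prefix_of_prefix h (List.prefix_append l _) with h1 | h1
      · exact h1
      · exfalso
        obtain ⟨body, t, rfl, hbody, ht⟩ := (pvShapes_get L hsh i l hl).2 hlast
        rcases ht with rfl | rfl | rfl | ⟨hx, _, _⟩
        · have : '\n' ∈ pat := h1.subset (by simp)
          exact (hterm _ this).1 rfl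
        · have : '\r' ∈ pat := h1.subset (by simp)
          exact (hterm _ this).2 rfl
        · have : '\r' ∈ pat := h1.subset (by simp)
          exact (hterm _ this).2 rfl
        · cases hx
    · have : L.drop (i + 1) = [] := List.drop_eq_nil_of_le (by omega)
      rw [this] at h
      simpa using h
  · intro h
    exact h.trans (List.prefix_append l _)

-- the character before a line start is '\r' or '\n' (or the line start is 0)
lemma pvPrev_at_pos {L : List (List Char)} (hsh : pvShapes L) {i : Nat} (hi : i < L.length) :
    pvPos L i = 0 ∨ (L.flatten)[pvPos L i - 1]? = some '\r' ∨ (L.flatten)[pvPos L i - 1]? = some '\n' := by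
  rcases i with _ | i'
  · left; rfl
  · right
    have hi' : i' < L.length := by omega
    obtain ⟨l', hl'⟩ : ∃ l', L[i']? = some l' := ⟨L[i'], List.getElem?_eq_getElem hi'⟩
    have hsp := (pvShapes_get L hsh i' l' hl').2 (by omega)
    obtain ⟨body, t, rfl, hbody, ht⟩ := hsp
    have hlne : (body ++ t) ≠ [] := by
      rcases ht with rfl | rfl | rfl | ⟨hx, _, _⟩ <;> simp
      cases hx
    have hlen1 : 1 ≤ (body ++ t).length := by
      have := List.length_pos_of_ne_nil hlne
      omega
    have hpos : pvPos L (i' + 1) = pvPos L i' + (body ++ t).length := by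
      rw [pvPos_add L (Nat.le_succ i')]
      have hdrop : L.drop i' = (body ++ t) :: L.drop (i' + 1) := by
        rw [List.drop_eq_getElem_cons hi']
        have := List.getElem?_eq_getElem hi'
        rw [hl'] at this
        rw [← Option.some_inj.mp this]
      rw [hdrop]
      simp
    have hidx : pvPos L (i' + 1) - 1 = pvPos L i' + ((body ++ t).length - 1) := by omega
    rw [hidx, pvGet_at_k L hl' (by omega)]
    rcases ht with rfl | rfl | rfl | ⟨hx, _, _⟩
    · right
      have : (body ++ ['\n']).length - 1 = body.length := by simp
      rw [this, List.getElem?_concat_length]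
    · left
      have : (body ++ ['\r']).length - 1 = body.length := by simp
      rw [this, List.getElem?_concat_length]
    · right
      have h2 : body ++ ['\r', '\n'] = (body ++ ['\r']) ++ ['\n'] := by simp
      have h1 : (body ++ ['\r', '\n']).length - 1 = (body ++ ['\r']).length := by simp
      rw [h1, h2, List.getElem?_concat_length]
    · cases hx

-- a '#'-leading, terminator-free pattern matching with a '\r'/'\n' (or BOF) on its left
-- can only sit at a line start
lemma pvAccept_at_linestart {L : List (List Char)} (hsh : pvShapes L) {pat : List Char}
    (hhead : pat.head? = some '#') (q : Nat)
    (hq : pat <+: (L.flatten).drop q)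
    (hprev : q = 0 ∨ (L.flatten)[q - 1]? = some '\r' ∨ (L.flatten)[q - 1]? = some '\n') :
    ∃ i, i < L.length ∧ q = pvPos L i := by
  have hpat : pat ≠ [] := by intro hx; rw [hx] at hhead; cases hhead
  have hqlt : q < L.flatten.length := by
    by_contra hx
    rw [List.drop_eq_nil_of_le (by omega)] at hq
    exact hpat (List.prefix_nil.mp hq)
  obtain ⟨i, l, k, hl, hk, rfl⟩ := pvFlatten_decomp L _ hqlt
  have hilt : i < L.length := by
    by_contra hx
    rw [List.getElem?_eq_none (by omega)] at hl; cases hl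
  rcases k with _ | k'
  · exact ⟨i, hilt, rfl⟩
  · exfalso
    -- the previous character is inside line l at offset k'
    have hprevEq : (L.flatten)[pvPos L i + (k' + 1) - 1]? = l[k']? := by
      have : pvPos L i + (k' + 1) - 1 = pvPos L i + k' := by omega
      rw [this, pvGet_at_k L hl (by omega)]
    obtain ⟨body, t, rfl, hbody, ht⟩ := (pvShapes_get L hsh i l hl).1
    rcases hprev with hz | hprev
    · omega
    · by_cases hkb : k' < body.length
      · -- previous char is a body char: not a terminator
        have : (body ++ t)[k']? = some body[k'] := by
          rw [List.getElem?_append_left hkb]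
          exact List.getElem?_eq_getElem hkb
        rw [hprevEq, this] at hprev
        have hmem : body[k'] ∈ body := List.getElem_mem _
        rcases hprev with h | h
        · exact (hbody _ hmem).2 (Option.some_inj.mp h)
        · exact (hbody _ hmem).1 (Option.some_inj.mp h)
      · -- previous char is in the terminator but not the line's last char: t = ['\r','\n']
        have htlen : k' + 1 - body.length < t.length := by
          simp only [List.length_append] at hk
          omega
        have hk'b : body.length ≤ k' := by omega
        have ht2 : t.length ≥ 2 := by omega
        rcases ht with rfl | rfl | rfl | ⟨_, rfl, _⟩ <;> simp at ht2
        -- t = ['\r', '\n']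
        have hk'eq : k' = body.length := by simp at htlen; omega
        -- the character AT the match position is '\n'
        have hcur : (L.flatten)[pvPos L i + (k' + 1)]? = some '\n' := by
          rw [pvGet_at_k L hl hk, hk'eq]
          have h2 : body ++ ['\r', '\n'] = (body ++ ['\r']) ++ ['\n'] := by simp
          have h1 : body.length + 1 = (body ++ ['\r']).length := by simp
          rw [h2, h1, List.getElem?_concat_length]
        -- but the pattern starts with '#'
        have hcur2 : (L.flatten)[pvPos L i + (k' + 1)]? = some '#' := by
          rw [← List.head?_drop]
          obtain ⟨u, hu⟩ := hq
          rw [← hu]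
          rcases pat with _ | ⟨c, pat'⟩
          · cases hhead
          · simp at hhead; simp [hhead]
        rw [hcur] at hcur2
        cases hcur2

-- ===== what pvFindLS finds: the first accepted position ≥ start =====
def pvAcc (cs pat : List Char) (excl : Option (List Char)) (q : Nat) : Prop :=
  pat <+: cs.drop q ∧
  (q = 0 ∨ cs[q - 1]? = some '\r' ∨ cs[q - 1]? = some '\n') ∧
  (∀ e, excl = some e → ¬ e <+: cs.drop q)

lemma pvCond_iff (cs : List Char) (excl : Option (List Char)) (p : Nat) :
    ((p == 0 || cs[p-1]? == some '\r' || cs[p-1]? == some '\n') &&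
      !(excl.any fun e => PySem.Chars.startswith (cs.drop p) e)) = true ↔
    ((p = 0 ∨ cs[p - 1]? = some '\r' ∨ cs[p - 1]? = some '\n') ∧
      (∀ e, excl = some e → ¬ e <+: cs.drop p)) := by
  cases excl with
  | none => simp [or_assoc]
  | some e =>
    simp only [Option.any_some, Bool.and_eq_true, Bool.or_eq_true, beq_iff_eq,
      Bool.not_eq_eq_eq_not, Bool.not_true, Option.some.injEq]
    constructor
    · rintro ⟨h1, h2⟩
      refine ⟨by tauto, ?_⟩
      rintro e' rfl
      rw [← PySem.Chars.startswith_iff, h2]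
      simp
    · rintro ⟨h1, h2⟩
      refine ⟨by tauto, ?_⟩
      have := h2 e rfl
      rw [← PySem.Chars.startswith_iff] at this
      simpa using this

-- no occurrence of pat in [start, r] region helper
lemma pvNoPrefix_ge {cs pat : List Char} {start : Nat} (hs : start ≤ cs.length)
    (hf : PySem.Chars.findFrom cs pat (start : Int) = -1) :
    ∀ r, start ≤ r → ¬ pat <+: cs.drop r := by
  intro r hr hpre
  have hinf : ¬ pat <:+: cs.drop start :=
    (PySem.Chars.findFrom_natCast_eq_neg_one_iff cs pat start hs).mp hf
  apply hinf
  rw [← PySem.Chars.isIn_iff_infix, ← PySem.Chars.exists_prefix_drop_iff_isIn]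
  refine ⟨r - start, ?_⟩
  rw [List.drop_drop, Nat.add_sub_cancel' hr]
  exact hpre

-- a successful str.find(pat, start) with pat ≠ '' lands in [start, len)
lemma pvFindFrom_pos {cs pat : List Char} {start : Nat} (hpat : pat ≠ []) (hs : start ≤ cs.length)
    (h : PySem.Chars.findFrom cs pat (start : Int) ≠ -1) :
    start ≤ (PySem.Chars.findFrom cs pat (start : Int)).toNat ∧
      (PySem.Chars.findFrom cs pat (start : Int)).toNat < cs.length := by
  obtain ⟨h1, h2, _⟩ := PySem.Chars.findFrom_natCast_spec cs pat start hs h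
  constructor
  · omega
  · rcases h2 with ⟨t, ht⟩
    have hlen := congrArg List.length ht
    simp [List.length_drop] at hlen
    have : pat.length ≠ 0 := fun hn => hpat (List.eq_nil_of_length_eq_zero hn)
    omega

lemma pvFindLS_none_char {cs pat : List Char} {excl : Option (List Char)} (hpat : pat ≠ []) :
    ∀ (fuel start : Nat), start ≤ cs.length → cs.length < start + fuel →
    pvFindLS cs pat excl fuel start = none →
    ∀ r, start ≤ r → ¬ pvAcc cs pat excl r := by
  intro fuel
  induction fuel with
  | zero => intro start hs hfuel _ ; omega
  | succ m ih =>
    intro start hs hfuel h r hr hacc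
    rw [pvFindLS] at h
    by_cases hf : PySem.Chars.findFrom cs pat (start : Int) = -1
    · exact pvNoPrefix_ge hs hf r hr hacc.1
    · rw [if_neg hf] at h
      simp only [] at h
      obtain ⟨hge, hpre, hmin⟩ := PySem.Chars.findFrom_natCast_spec cs pat start hs hf
      obtain ⟨hp1, hp2⟩ := pvFindFrom_pos hpat hs hf
      split at h
      · cases h
      · rename_i hc
        by_cases hrp : r < (PySem.Chars.findFrom cs pat (start : Int)).toNat
        · exact hmin r hr hrp hacc.1
        · by_cases hreq : r = (PySem.Chars.findFrom cs pat (start : Int)).toNat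
          · subst hreq
            exact hc ((pvCond_iff cs excl _).mpr ⟨hacc.2.1, hacc.2.2⟩)
          · exact ih _ (by omega) (by omega) h r (by omega) hacc

lemma pvFindLS_some_char {cs pat : List Char} {excl : Option (List Char)} (hpat : pat ≠ []) :
    ∀ (fuel start : Nat), start ≤ cs.length → cs.length < start + fuel →
    ∀ {q : Nat}, pvFindLS cs pat excl fuel start = some q →
    start ≤ q ∧ pvAcc cs pat excl q ∧ ∀ r, start ≤ r → r < q → ¬ pvAcc cs pat excl r := by
  intro fuel
  induction fuel with
  | zero => intro start hs hfuel _ _; omega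
  | succ m ih =>
    intro start hs hfuel q h
    rw [pvFindLS] at h
    by_cases hf : PySem.Chars.findFrom cs pat (start : Int) = -1
    · rw [if_pos hf] at h
      cases h
    · rw [if_neg hf] at h
      simp only [] at h
      obtain ⟨hge, hpre, hmin⟩ := PySem.Chars.findFrom_natCast_spec cs pat start hs hf
      obtain ⟨hp1, hp2⟩ := pvFindFrom_pos hpat hs hf
      split at h
      · rename_i hc
        cases h
        obtain ⟨h1, h2⟩ := (pvCond_iff cs excl _).mp hc
        refine ⟨by omega, ⟨hpre, h1, h2⟩, ?_⟩
        intro r hr hrq hacc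
        exact hmin r hr hrq hacc.1
      · rename_i hc
        obtain ⟨ih1, ih2, ih3⟩ := ih _ (by omega) (by omega) h
        refine ⟨by omega, ih2, ?_⟩
        intro r hr hrq hacc
        by_cases hrp : r < (PySem.Chars.findFrom cs pat (start : Int)).toNat
        · exact hmin r hr hrp hacc.1
        · by_cases hreq : r = (PySem.Chars.findFrom cs pat (start : Int)).toNat
          · subst hreq
            exact hc ((pvCond_iff cs excl _).mpr ⟨hacc.2.1, hacc.2.2⟩)
          · exact ih3 r (by omega) hrq hacc

lemma pvPos_lt_len {L : List (List Char)} (hsh : pvShapes L) {i : Nat} (hi : i < L.length) :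
    pvPos L i < L.flatten.length := by
  obtain ⟨l, hl⟩ : ∃ l, L[i]? = some l := ⟨L[i], List.getElem?_eq_getElem hi⟩
  calc pvPos L i < pvPos L L.length :=
        pvPos_strict L hi hl (pvShape_ne_nil (pvShapes_get L hsh i l hl).1)
    _ = L.flatten.length := pvPos_length L

lemma pvMonHdr_eq : pvMonHdr = ['#','#',' ','C','.',' ','M','o','n','i','t','o','r','i','n','g'] := rfl

lemma pvMonFacts : pvMonHdr ≠ [] ∧ pvMonHdr.head? = some '#' ∧ ∀ c ∈ pvMonHdr, c ≠ '\n' ∧ c ≠ '\r' := by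
  rw [pvMonHdr_eq]
  refine ⟨by simp, rfl, by simp⟩

lemma pvHdr_eq : pvHdr = ['#','#',' '] := rfl

lemma pvHdrFacts : pvHdr ≠ [] ∧ pvHdr.head? = some '#' ∧ ∀ c ∈ pvHdr, c ≠ '\n' ∧ c ≠ '\r' := by
  rw [pvHdr_eq]
  refine ⟨by simp, rfl, by simp⟩

-- acceptance at a raw position ↔ the corresponding line matches
lemma pvAcc_iff_line {L : List (List Char)} (hsh : pvShapes L) {pat : List Char}
    (hhead : pat.head? = some '#') (hterm : ∀ c ∈ pat, c ≠ '\n' ∧ c ≠ '\r')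
    {excl : Option (List Char)}
    (hexcl : ∀ e, excl = some e → (e ≠ [] ∧ ∀ c ∈ e, c ≠ '\n' ∧ c ≠ '\r'))
    (q : Nat) :
    pvAcc L.flatten pat excl q ↔
      ∃ i l, i < L.length ∧ q = pvPos L i ∧ L[i]? = some l ∧ pat <+: l ∧
        (∀ e, excl = some e → ¬ e <+: l) := by
  have hpat : pat ≠ [] := by intro hx; rw [hx] at hhead; cases hhead
  constructor
  · rintro ⟨h1, h2, h3⟩
    obtain ⟨i, hi, rfl⟩ := pvAccept_at_linestart hsh hhead q h1 h2
    obtain ⟨l, hl⟩ : ∃ l, L[i]? = some l := ⟨L[i], List.getElem?_eq_getElem hi⟩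
    refine ⟨i, l, hi, rfl, hl, (pvPrefix_at_pos hsh hpat hterm hl).mp h1, ?_⟩
    intro e he hpre
    obtain ⟨hene, heterm⟩ := hexcl e he
    exact h3 e he ((pvPrefix_at_pos hsh hene heterm hl).mpr hpre)
  · rintro ⟨i, l, hi, rfl, hl, hpre, hne⟩
    refine ⟨(pvPrefix_at_pos hsh hpat hterm hl).mpr hpre, pvPrev_at_pos hsh hi, ?_⟩
    intro e he hpre'
    obtain ⟨hene, heterm⟩ := hexcl e he
    exact hne e he ((pvPrefix_at_pos hsh hene heterm hl).mp hpre')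

lemma pvPhase1_eq (L : List (List Char)) (hsh : pvShapes L) (cs : List Char)
    (hcs : cs = L.flatten) (fuel : Nat) (hfuel : cs.length < fuel) :
    pvFindLS cs pvMonHdr none fuel 0 = (pvFindMon L 0).map (pvPos L) := by
  subst hcs
  obtain ⟨hne, hhead, hterm⟩ := pvMonFacts
  have hiff := pvAcc_iff_line (excl := none) hsh hhead hterm (by intro e he; cases he)
  rcases hmon : pvFindMon L 0 with _ | i0
  · have hln := pvFindMon_none L 0 hmon
    rcases hb : pvFindLS L.flatten pvMonHdr none fuel 0 with _ | q
    · rfl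
    · exfalso
      obtain ⟨_, hacc, _⟩ := pvFindLS_some_char hne fuel 0 (Nat.zero_le _) (by omega) hb
      obtain ⟨i, l, hi, rfl, hl, hpre, _⟩ := (hiff _).mp hacc
      have := hln l (List.mem_of_getElem? hl)
      exact absurd ((PySem.Chars.startswith_iff l pvMonHdr).mpr hpre) (by simp [this])
  · obtain ⟨_, hlt, ⟨l0, hl0, hsw0⟩, hmin⟩ := pvFindMon_some L 0 i0 hmon
    simp only [Nat.sub_zero] at hlt hl0 hmin
    have hi0 : i0 < L.length := hlt
    have haccI0 : pvAcc L.flatten pvMonHdr none (pvPos L i0) :=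
      (hiff _).mpr ⟨i0, l0, hi0, rfl, hl0, (PySem.Chars.startswith_iff _ _).mp hsw0, by intro e he; cases he⟩
    rcases hb : pvFindLS L.flatten pvMonHdr none fuel 0 with _ | q
    · exact absurd haccI0 (pvFindLS_none_char hne fuel 0 (Nat.zero_le _) (by omega) hb _ (Nat.zero_le _))
    · obtain ⟨_, hacc, hminB⟩ := pvFindLS_some_char hne fuel 0 (Nat.zero_le _) (by omega) hb
      obtain ⟨i, l, hi, rfl, hl, hpre, _⟩ := (hiff _).mp hacc
      have hii0 : i0 ≤ i := by
        by_contra hx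
        have := hmin i (by omega) l hl
        exact absurd ((PySem.Chars.startswith_iff l pvMonHdr).mpr hpre) (by simp [this])
      have h1 : pvPos L i0 ≤ pvPos L i := pvPos_mono L hii0
      have h2 : ¬ pvPos L i0 < pvPos L i := by
        intro hx
        exact hminB _ (Nat.zero_le _) hx haccI0
      have : pvPos L i = pvPos L i0 := by omega
      simp [this]

lemma pvPhase2_eq (L : List (List Char)) (hsh : pvShapes L) (cs : List Char)
    (hcs : cs = L.flatten) {i0 : Nat} (hi0 : i0 < L.length)
    {start : Nat} (hstart : start = pvPos L i0 + 1) (fuel : Nat)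
    (hfuel : cs.length < start + fuel) :
    pvFindLS cs pvHdr (some pvMonHdr) fuel start =
      (pvFindHdr (L.drop (i0 + 1)) (i0 + 1)).map (pvPos L) := by
  subst hcs
  subst hstart
  have hs : pvPos L i0 + 1 ≤ L.flatten.length := pvPos_lt_len hsh hi0
  obtain ⟨hne, hhead, hterm⟩ := pvHdrFacts
  obtain ⟨hmne, hmhead, hmterm⟩ := pvMonFacts
  have hiff := pvAcc_iff_line (excl := some pvMonHdr) hsh hhead hterm
    (by rintro e he; cases he; exact ⟨hmne, hmterm⟩)
  -- any accepted position ≥ pvPos L i0 + 1 sits on a line with index > i0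
  have hline_of_acc : ∀ q, pvPos L i0 + 1 ≤ q → pvAcc L.flatten pvHdr (some pvMonHdr) q →
      ∃ i l, i0 + 1 ≤ i ∧ i < L.length ∧ q = pvPos L i ∧ L[i]? = some l ∧
        pvHdr <+: l ∧ ¬ pvMonHdr <+: l := by
    intro q hq hacc
    obtain ⟨i, l, hi, rfl, hl, hpre, hnm⟩ := (hiff _).mp hacc
    have hii0 : i0 + 1 ≤ i := by
      by_contra hx
      have : pvPos L i ≤ pvPos L i0 := pvPos_mono L (by omega)
      omega
    exact ⟨i, l, hii0, hi, rfl, hl, hpre, hnm pvMonHdr rfl⟩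
  rcases hhdr : pvFindHdr (L.drop (i0 + 1)) (i0 + 1) with _ | j
  · have hln := pvFindHdr_none _ _ hhdr
    rcases hb : pvFindLS L.flatten pvHdr (some pvMonHdr) fuel (pvPos L i0 + 1) with _ | q
    · rfl
    · exfalso
      obtain ⟨hge, hacc, _⟩ := pvFindLS_some_char hne fuel _ hs (by omega) hb
      obtain ⟨i, l, hii0, hi, rfl, hl, hpre, hnm⟩ := hline_of_acc _ hge hacc
      have hmem : l ∈ L.drop (i0 + 1) := by
        refine List.mem_of_getElem? (i := i - (i0 + 1)) ?_
        rw [List.getElem?_drop]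
        rwa [Nat.add_sub_cancel' hii0]
      have := hln l hmem
      rw [Bool.and_eq_false_iff] at this
      rcases this with h | h
      · exact absurd ((PySem.Chars.startswith_iff l pvHdr).mpr hpre) (by simp [h])
      · rw [Bool.not_eq_false', PySem.Chars.startswith_iff] at h
        exact hnm h
  · obtain ⟨hj1, hj2, ⟨lj, hlj, hswj⟩, hmin⟩ := pvFindHdr_some _ _ j hhdr
    have hjlen : j < L.length := by
      rw [List.length_drop] at hj2
      omega
    have hljL : L[j]? = some lj := by
      rw [List.getElem?_drop] at hlj
      rwa [Nat.add_sub_cancel' hj1] at hlj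
    rw [Bool.and_eq_true, Bool.not_eq_eq_eq_not, Bool.not_true] at hswj
    obtain ⟨hswj1, hswj2⟩ := hswj
    -- line i0 is nonempty, so pvPos L i0 < pvPos L j
    obtain ⟨l0, hl0⟩ : ∃ l0, L[i0]? = some l0 := ⟨L[i0], List.getElem?_eq_getElem hi0⟩
    have hposj : pvPos L i0 + 1 ≤ pvPos L j :=
      pvPos_strict L (by omega) hl0 (pvShape_ne_nil (pvShapes_get L hsh i0 l0 hl0).1)
    have haccJ : pvAcc L.flatten pvHdr (some pvMonHdr) (pvPos L j) := by
      refine (hiff _).mpr ⟨j, lj, hjlen, rfl, hljL, (PySem.Chars.startswith_iff _ _).mp hswj1, ?_⟩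
      rintro e he
      cases he
      rw [← PySem.Chars.startswith_iff, hswj2]
      simp
    rcases hb : pvFindLS L.flatten pvHdr (some pvMonHdr) fuel (pvPos L i0 + 1) with _ | q
    · exact absurd haccJ (pvFindLS_none_char hne fuel _ hs (by omega) hb _ hposj)
    · obtain ⟨hge, hacc, hminB⟩ := pvFindLS_some_char hne fuel _ hs (by omega) hb
      obtain ⟨i, l, hii0, hi, rfl, hl, hpre, hnm⟩ := hline_of_acc _ hge hacc
      have hij : j ≤ i := by
        by_contra hx
        have := hmin (i - (i0 + 1)) (by omega) l (by rw [List.getElem?_drop, Nat.add_sub_cancel' hii0]; exact hl)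
        rw [Bool.and_eq_false_iff] at this
        rcases this with h | h
        · exact absurd ((PySem.Chars.startswith_iff l pvHdr).mpr hpre) (by simp [h])
        · rw [Bool.not_eq_false', PySem.Chars.startswith_iff] at h
          exact hnm h
      have h1 : pvPos L j ≤ pvPos L i := pvPos_mono L hij
      have h2 : ¬ pvPos L j < pvPos L i := by
        intro hx
        exact hminB _ hposj hx haccJ
      have : pvPos L i = pvPos L j := by omega
      simp [this]

-- ===== VERDICT (by name: the statement is the Claim_ definition above) =====
theorem may1_add_mon_new_py_spec : Claim_equal_may1_add_mon_new_py := by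
  intro text _
  unfold Spec_may1_add_mon_new_py
  have hflat : (pvSplitKeep text.toList []).flatten = text.toList := by
    simpa using pvSplitKeep_flatten text.toList []
  have hsh : pvShapes (pvSplitKeep text.toList []) :=
    pvSplitKeep_shapes text.toList [] (by simp)
  have hA0 := pvAGo_false (pvSplitKeep text.toList []) (pvSplitKeep text.toList []).length 0 (by omega)
  simp only [List.drop_zero] at hA0
  simp only [may1_add_mon_new_py, may1_add_mon_new_py_alt]
  rw [hA0]
  rcases hmon : pvFindMon (pvSplitKeep text.toList []) 0 with _ | i0
  · dsimp only
    split
    · rename_i p heq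
      rw [pvPhase1_eq (pvSplitKeep text.toList []) hsh text.toList hflat.symm _ (by omega)] at heq
      rw [hmon] at heq
      cases heq
    · rfl
  · dsimp only
    obtain ⟨_, hi0, _, _⟩ := pvFindMon_some _ 0 i0 hmon
    simp only [Nat.sub_zero] at hi0
    rcases hhdr : pvFindHdr ((pvSplitKeep text.toList []).drop (i0 + 1)) (i0 + 1) with _ | j
    · dsimp only [Option.map_none]
      split
      · rename_i p heq
        rw [pvPhase1_eq (pvSplitKeep text.toList []) hsh text.toList hflat.symm _ (by omega), hmon] at heq
        simp only [Option.map_some, Option.some_inj] at heq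
        split
        · rename_i q heq2
          rw [pvPhase2_eq (pvSplitKeep text.toList []) hsh text.toList hflat.symm hi0
            (hstart := by rw [heq]) _ (by omega), hhdr] at heq2
          cases heq2
        · rfl
      · rename_i heq
        rw [pvPhase1_eq (pvSplitKeep text.toList []) hsh text.toList hflat.symm _ (by omega), hmon] at heq
    · dsimp only [Option.map_some]
      obtain ⟨hj1, hj2, _, _⟩ := pvFindHdr_some _ _ j hhdr
      have hjlen : j ≤ (pvSplitKeep text.toList []).length := by
        rw [List.length_drop] at hj2
        omega
      split
      · rename_i p heq
        rw [pvPhase1_eq (pvSplitKeep text.toList []) hsh text.toList hflat.symm _ (by omega), hmon] at heq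
        simp only [Option.map_some, Option.some_inj] at heq
        split
        · rename_i q heq2
          rw [pvPhase2_eq (pvSplitKeep text.toList []) hsh text.toList hflat.symm hi0
            (hstart := by rw [heq]) _ (by omega), hhdr] at heq2
          simp only [Option.map_some, Option.some_inj] at heq2
          rw [PySem.List.insert_natCast _ _ _ hjlen, ← heq2]
          have ht := pvPos_take (pvSplitKeep text.toList []) j
          have hd := pvPos_drop (pvSplitKeep text.toList []) j
          rw [hflat] at ht hd
          rw [ht, hd]
          simp [List.flatten_append]
        · rename_i heq2
          rw [pvPhase2_eq (pvSplitKeep text.toList []) hsh text.toList hflat.symm hi0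
            (hstart := by rw [heq]) _ (by omega), hhdr] at heq2
          cases heq2
      · rename_i heq
        rw [pvPhase1_eq (pvSplitKeep text.toList []) hsh text.toList hflat.symm _ (by omega), hmon] at heq
        cases heq
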